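-- pv_equiv track=rewrite | github.com/yuadamding/CliPP2 | sim/plotting.py | _children_from_parent
-- ===== SOURCE A (Python) =====
-- def _children_from_parent(parent: dict[int, int]) -> dict[int, list[int]]:
--     children = {node: [] for node in parent}
--     for node, p in parent.items():
--         if p >= 0:
--             children.setdefault(p, []).append(node)
--     for node in children:
--         children[node] = sorted(children[node])
--     return children
-- ===== SOURCE B (Python) =====
-- def _children_from_parent(parent: dict[int, int]) -> dict[int, list[int]]:
--     children = {node: [] for node in parent}
--     for node, p in parent.items():
--         if p >= 0:
--             children.setdefault(p, [])
--     for node in sorted(parent):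
--         p = parent[node]
--         if p >= 0:
--             children[p].append(node)
--     return children
-- ===== Notes on version B (the rewrite author's own statement) =====
-- stated objective: alternative
-- what changed: B sorts the node set once globally and fills the children lists by iterating nodes in ascending order (after a setdefault pass that registers keys in A's order), so every list is built already sorted, replacing A's per-key sort pass.
import Mathlib
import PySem

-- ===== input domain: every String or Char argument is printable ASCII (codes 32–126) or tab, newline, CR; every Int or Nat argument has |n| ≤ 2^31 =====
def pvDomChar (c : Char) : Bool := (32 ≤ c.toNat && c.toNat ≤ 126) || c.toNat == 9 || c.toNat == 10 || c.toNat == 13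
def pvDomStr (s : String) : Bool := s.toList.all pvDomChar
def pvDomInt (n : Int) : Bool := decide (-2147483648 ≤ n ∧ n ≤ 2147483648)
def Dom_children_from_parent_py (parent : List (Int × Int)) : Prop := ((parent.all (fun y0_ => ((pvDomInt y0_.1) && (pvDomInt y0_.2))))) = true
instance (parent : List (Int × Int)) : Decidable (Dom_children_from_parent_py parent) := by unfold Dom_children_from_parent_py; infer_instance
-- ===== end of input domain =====

-- B fills the children lists in one globally node-sorted pass (after registering the keys
-- in A's order), so every list comes out sorted without A's per-list sort pass
-- (alternative decomposition: one global sort instead of one sort per list).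


-- ===== PORT A =====
def children_from_parent_py (parent : List (Int × Int)) : List (Int × List Int) :=
  -- children = {node: [] for node in parent}
  let children : PySem.Dict Int (List Int) :=
    parent.foldl (fun d p => d.insert p.1 ([] : List Int)) PySem.Dict.empty
  -- for node, p in parent.items(): if p >= 0: children.setdefault(p, []).append(node)
  let children :=
    parent.foldl (fun d p => if p.2 ≥ 0 then d.modify p.2 [] (fun l => l ++ [p.1]) else d) children
  -- for node in children: children[node] = sorted(children[node])
  let children :=
    children.keys.foldl (fun d k => d.insert k (PySem.List.sorted (d.getD k []) (fun x => x))) children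
  children.items

-- ===== PORT B =====
def children_from_parent_py_alt (parent : List (Int × Int)) : List (Int × List Int) :=
  -- children = {node: [] for node in parent}
  let children : PySem.Dict Int (List Int) :=
    parent.foldl (fun d p => d.insert p.1 ([] : List Int)) PySem.Dict.empty
  -- for node, p in parent.items(): if p >= 0: children.setdefault(p, [])
  let children :=
    parent.foldl (fun d p => if p.2 ≥ 0 then d.setdefault p.2 [] else d) children
  -- for node in sorted(parent): p = parent[node]; if p >= 0: children[p].append(node)
  -- (children[p].append(node) appends in place to the existing list at key p: modify;
  --  parent[node] is the dict lookup, exact via Dict.get?; the none branch is unreachable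
  --  since every node comes from parent's keys)
  let children :=
    (PySem.List.sorted (parent.map Prod.fst) (fun x => x)).foldl
      (fun d node =>
        match (PySem.Dict.mk parent).get? node with
        | some p => if p ≥ 0 then d.modify p [] (fun l => l ++ [node]) else d
        | none => d)
      children
  children.items

-- ===== PRECONDITION & SPEC =====
-- Pre_ excludes association lists with duplicate keys: they do not represent a Python
-- dict (the dict the caller passes always has distinct keys; a duplicate-key list
-- collapses on the Python side before either function runs).
def Pre_children_from_parent_py (parent : List (Int × Int)) : Prop :=
  (parent.map Prod.fst).Nodup
instance (parent : List (Int × Int)) : Decidable (Pre_children_from_parent_py parent) := by unfold Pre_children_from_parent_py; infer_instance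

def pvWitness_children_from_parent_py : (List (Int × Int)) := [(0, -1), (1, 0), (2, 0), (3, 5)]

def Spec_children_from_parent_py (parent : List (Int × Int)) (out : List (Int × List Int)) : Prop := out = children_from_parent_py_alt parent
instance (parent : List (Int × Int)) (out : List (Int × List Int)) : Decidable (Spec_children_from_parent_py parent out) := by unfold Spec_children_from_parent_py; infer_instance

-- ===== CLAIM (what is proved, stated in full; the proofs are below) =====
def Claim_equal_children_from_parent_py : Prop := ∀ (parent : List (Int × Int)), Dom_children_from_parent_py parent → Pre_children_from_parent_py parent → Spec_children_from_parent_py parent (children_from_parent_py parent)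

-- ===== LEMMAS AND PROOFS =====

-- the pairs of parent that contribute a child to key k (A's grouping loop)
def predK (k : Int) (p : Int × Int) : Bool := decide (0 ≤ p.2) && (p.2 == k)

-- the nodes of the sorted pass that land at key k (B's fill loop)
def condK (parent : List (Int × Int)) (k : Int) (node : Int) : Bool :=
  match (PySem.Dict.mk parent).get? node with
  | some p => decide (0 ≤ p) && (p == k)
  | none => false

-- all values of the init dict are []
lemma init_getD (l : List (Int × Int)) :
    ∀ (d : PySem.Dict Int (List Int)), (∀ k, d.getD k [] = []) →
    ∀ k, (l.foldl (fun d p => d.insert p.1 ([] : List Int)) d).getD k [] = [] := by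
  induction l with
  | nil => intro d hd k; exact hd k
  | cons p rest ih =>
    intro d hd k
    simp only [List.foldl_cons]
    exact ih _ (fun j => by rw [PySem.Dict.getD_insert]; split <;> simp [hd]) k

lemma nodup_keys_modify {d : PySem.Dict Int (List Int)} (k : Int) (f : List Int → List Int)
    (h : d.keys.Nodup) : (d.modify k [] f).keys.Nodup := by
  rw [PySem.Dict.keys_modify]
  by_cases hc : d.contains k = true
  · rw [PySem.Dict.keys_insert_of_contains _ _ hc]; exact h
  · rw [PySem.Dict.keys_insert_of_not_contains _ _ (by simpa using hc)]
    refine List.Nodup.append h (by simp) ?_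
    intro a ha hb
    simp only [List.mem_singleton] at hb
    subst hb
    have := PySem.Dict.contains_eq_decide_mem_keys d a
    rw [this] at hc
    simp at hc
    exact hc ha

lemma nodup_keys_loopA (l : List (Int × Int)) :
    ∀ (d : PySem.Dict Int (List Int)), d.keys.Nodup →
    (l.foldl (fun d p => if p.2 ≥ 0 then d.modify p.2 [] (fun v => v ++ [p.1]) else d) d).keys.Nodup := by
  induction l with
  | nil => intro d h; exact h
  | cons p rest ih =>
    intro d h
    simp only [List.foldl_cons]
    split
    · exact ih _ (nodup_keys_modify _ _ h)
    · exact ih _ h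

lemma keys_setdefault (d : PySem.Dict Int (List Int)) (k : Int) (v : List Int) :
    (d.setdefault k v).keys = if d.contains k then d.keys else d.keys ++ [k] := by
  by_cases hc : d.contains k = true
  · rw [PySem.Dict.setdefault_of_contains _ _ hc, if_pos hc]
  · rw [PySem.Dict.setdefault_of_not_contains _ _ (by simpa using hc),
      PySem.Dict.keys_insert_of_not_contains _ _ (by simpa using hc), if_neg hc]

-- A's grouping loop and B's key-registration loop create the same keys in the same order
lemma keys_LA_RB (l : List (Int × Int)) :
    ∀ (dA dB : PySem.Dict Int (List Int)), dA.keys = dB.keys →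
    (l.foldl (fun d p => if p.2 ≥ 0 then d.modify p.2 [] (fun v => v ++ [p.1]) else d) dA).keys =
      (l.foldl (fun d p => if p.2 ≥ 0 then d.setdefault p.2 [] else d) dB).keys := by
  induction l with
  | nil => intro dA dB hk; exact hk
  | cons p rest ih =>
    intro dA dB hk
    simp only [List.foldl_cons]
    by_cases hp : p.2 ≥ 0
    · simp only [if_pos hp]
      apply ih
      have hc : dA.contains p.2 = dB.contains p.2 := by
        rw [PySem.Dict.contains_eq_decide_mem_keys, PySem.Dict.contains_eq_decide_mem_keys, hk]
      rw [PySem.Dict.keys_modify, keys_setdefault]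
      by_cases hca : dA.contains p.2 = true
      · rw [PySem.Dict.keys_insert_of_contains _ _ hca, if_pos (hc ▸ hca), hk]
      · rw [PySem.Dict.keys_insert_of_not_contains _ _ (by simpa using hca),
          if_neg (by rw [← hc]; simpa using hca), hk]
    · simp only [if_neg hp]
      exact ih dA dB hk

-- B's registration loop keeps every value []
lemma getD_RB (l : List (Int × Int)) :
    ∀ (d : PySem.Dict Int (List Int)), (∀ k, d.getD k [] = []) →
    ∀ k, (l.foldl (fun d p => if p.2 ≥ 0 then d.setdefault p.2 ([] : List Int) else d) d).getD k [] = [] := by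
  induction l with
  | nil => intro d hd k; exact hd k
  | cons p rest ih =>
    intro d hd k
    simp only [List.foldl_cons]
    by_cases hp : p.2 ≥ 0
    · simp only [if_pos hp]
      refine ih _ (fun j => ?_) k
      by_cases hc : d.contains p.2 = true
      · rw [PySem.Dict.setdefault_of_contains _ _ hc]; exact hd j
      · rw [PySem.Dict.setdefault_of_not_contains _ _ (by simpa using hc),
          PySem.Dict.getD_insert]
        split <;> simp [hd]
    · simp only [if_neg hp]; exact ih d hd k

lemma mem_keys_setdefault (d : PySem.Dict Int (List Int)) (k j : Int) (v : List Int)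
    (h : j ∈ d.keys) : j ∈ (d.setdefault k v).keys := by
  rw [keys_setdefault]; split <;> simp [h]

lemma mem_keys_setdefault_self (d : PySem.Dict Int (List Int)) (k : Int) (v : List Int) :
    k ∈ (d.setdefault k v).keys := by
  rw [keys_setdefault]
  split
  · next hc => rw [PySem.Dict.contains_eq_decide_mem_keys] at hc; simpa using hc
  · simp

lemma mem_keys_RB_mono (l : List (Int × Int)) :
    ∀ (d : PySem.Dict Int (List Int)) (j : Int), j ∈ d.keys →
    j ∈ (l.foldl (fun d p => if p.2 ≥ 0 then d.setdefault p.2 ([] : List Int) else d) d).keys := by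
  induction l with
  | nil => intro d j h; exact h
  | cons p rest ih =>
    intro d j h
    simp only [List.foldl_cons]
    by_cases hp : p.2 ≥ 0
    · simp only [if_pos hp]; exact ih _ j (mem_keys_setdefault _ _ _ _ h)
    · simp only [if_neg hp]; exact ih d j h

-- every nonnegative parent value ends up among the registered keys
lemma mem_keys_RB_of_mem (l : List (Int × Int)) :
    ∀ (d : PySem.Dict Int (List Int)) (q : Int × Int), q ∈ l → 0 ≤ q.2 →
    q.2 ∈ (l.foldl (fun d p => if p.2 ≥ 0 then d.setdefault p.2 ([] : List Int) else d) d).keys := by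
  induction l with
  | nil => intro d q h; simp at h
  | cons p rest ih =>
    intro d q hq h0
    simp only [List.foldl_cons]
    rcases List.mem_cons.mp hq with rfl | hq
    · rw [if_pos (by exact h0)]
      exact mem_keys_RB_mono rest _ q.2 (mem_keys_setdefault_self _ _ _)
    · by_cases hp : p.2 ≥ 0
      · simp only [if_pos hp]; exact ih _ q hq h0
      · simp only [if_neg hp]; exact ih d q hq h0

-- the fill loop only touches existing keys, so it keeps the key list
lemma keys_FB (parent : List (Int × Int)) (ks : List Int) :
    ∀ (d : PySem.Dict Int (List Int)),
    (∀ node p, (PySem.Dict.mk parent).get? node = some p → 0 ≤ p → p ∈ d.keys) →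
    (ks.foldl (fun d node =>
        match (PySem.Dict.mk parent).get? node with
        | some p => if p ≥ 0 then d.modify p [] (fun l => l ++ [node]) else d
        | none => d) d).keys = d.keys := by
  induction ks with
  | nil => intro d _; rfl
  | cons node rest ih =>
    intro d hd
    simp only [List.foldl_cons]
    cases hg : (PySem.Dict.mk parent).get? node with
    | none => simpa only [hg] using ih d hd
    | some p =>
      by_cases hp : p ≥ 0
      · simp only [if_pos hp]
        have hmem : p ∈ d.keys := hd node p hg hp
        have hkeys : (d.modify p [] (fun l => l ++ [node])).keys = d.keys := by
          rw [PySem.Dict.keys_modify, PySem.Dict.keys_insert_of_contains]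
          rw [PySem.Dict.contains_eq_decide_mem_keys]; simpa using hmem
        rw [ih _ (fun n q hq h0 => hkeys ▸ hd n q hq h0), hkeys]
      · simp only [if_neg hp]; exact ih d hd

-- value accumulated by B's fill loop at key k
lemma getD_FB (parent : List (Int × Int)) (ks : List Int) :
    ∀ (d : PySem.Dict Int (List Int)) (k : Int),
    (ks.foldl (fun d node =>
        match (PySem.Dict.mk parent).get? node with
        | some p => if p ≥ 0 then d.modify p [] (fun l => l ++ [node]) else d
        | none => d) d).getD k [] = d.getD k [] ++ ks.filter (condK parent k) := by
  induction ks with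
  | nil => intro d k; simp
  | cons node rest ih =>
    intro d k
    simp only [List.foldl_cons, List.filter_cons]
    cases hg : (PySem.Dict.mk parent).get? node with
    | none =>
      rw [ih]
      have : condK parent k node = false := by simp [condK, hg]
      rw [this]
      simp
    | some p =>
      by_cases hp : p ≥ 0
      · simp only [if_pos hp]
        rw [ih]
        by_cases hk : p = k
        · subst hk
          rw [PySem.Dict.getD_modify, if_pos rfl]
          have : condK parent p node = true := by simp [condK, hg, hp]
          rw [this]
          simp
        · rw [PySem.Dict.getD_modify, if_neg (fun h => hk h.symm)]
          have : condK parent k node = false := by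
            simp only [condK, hg]
            simp [hk]
          rw [this]
          simp
      · simp only [if_neg hp]
        rw [ih]
        have : condK parent k node = false := by
          simp only [condK, hg]
          have : ¬ (0 ≤ p) := by simpa using hp
          simp [this]
        rw [this]
        simp

-- value accumulated by A's grouping loop at key k
lemma getD_LA (l : List (Int × Int)) :
    ∀ (d : PySem.Dict Int (List Int)) (k : Int),
    (l.foldl (fun d p => if p.2 ≥ 0 then d.modify p.2 [] (fun v => v ++ [p.1]) else d) d).getD k [] =
      d.getD k [] ++ (l.filter (predK k)).map Prod.fst := by
  induction l with
  | nil => intro d k; simp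
  | cons p rest ih =>
    intro d k
    simp only [List.foldl_cons, List.filter_cons]
    by_cases hp : p.2 ≥ 0
    · simp only [if_pos hp]
      rw [ih]
      by_cases hk : p.2 = k
      · subst hk
        have hpred : predK p.2 p = true := by simp [predK, hp]
        rw [hpred, PySem.Dict.getD_modify, if_pos rfl]
        simp
      · have hpred : predK k p = false := by simp [predK, hk]
        rw [hpred, PySem.Dict.getD_modify, if_neg (fun h => hk h.symm)]
        simp
    · simp only [if_neg hp]
      have hpred : predK k p = false := by
        have h0 : ¬ (0 ≤ p.2) := by simpa using hp
        simp [predK, h0]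
      rw [hpred, ih]
      simp

-- with distinct keys, the dict lookup of any listed pair is its own value
lemma get?_parent (parent : List (Int × Int)) (hnd : (parent.map Prod.fst).Nodup)
    {n p : Int} (h : (n, p) ∈ parent) : (PySem.Dict.mk parent).get? n = some p := by
  apply PySem.Dict.get?_of_mem_items (d := PySem.Dict.mk parent) h
  simpa [PySem.Dict.keys] using hnd

-- filtering node-wise (via the lookup) = filtering pair-wise, under distinct keys
lemma map_filter_eq (parent : List (Int × Int)) (k : Int) :
    ∀ (l : List (Int × Int)), (∀ q ∈ l, (PySem.Dict.mk parent).get? q.1 = some q.2) →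
    (l.map Prod.fst).filter (condK parent k) = (l.filter (predK k)).map Prod.fst := by
  intro l
  induction l with
  | nil => intro _; rfl
  | cons q rest ih =>
    intro hl
    have hq : (PySem.Dict.mk parent).get? q.1 = some q.2 := hl q (by simp)
    have hcond : condK parent k q.1 = predK k q := by
      simp only [condK, predK, hq]
    simp only [List.map_cons, List.filter_cons, hcond]
    rw [ih (fun r hr => hl r (by simp [hr]))]
    by_cases hpred : predK k q = true
    · simp [hpred]
    · simp [eq_false_of_ne_true hpred]

-- sorting each group = filtering the globally sorted node list, under distinct keys
lemma sorted_group_eq (parent : List (Int × Int)) (hnd : (parent.map Prod.fst).Nodup) (k : Int) :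
    PySem.List.sorted ((parent.filter (predK k)).map Prod.fst) (fun x => x) =
      (PySem.List.sorted (parent.map Prod.fst) (fun x => x)).filter (condK parent k) := by
  apply PySem.List.sorted_id_eq_of_perm_of_pairwise
  · have h1 : ((PySem.List.sorted (parent.map Prod.fst) (fun x => x)).filter (condK parent k)).Perm
        ((parent.map Prod.fst).filter (condK parent k)) :=
      (PySem.List.sorted_perm _ _ false).filter _
    rw [map_filter_eq parent k parent (fun q hq => get?_parent parent hnd hq)] at h1
    exact h1
  · exact (PySem.List.sorted_pairwise (parent.map Prod.fst) (fun x => x)).filter _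

-- the final pass of A sorts every value in place and keeps the keys
lemma sortpass (ks : List Int) :
    ks.Nodup → ∀ (a : PySem.Dict Int (List Int)), (∀ k ∈ ks, k ∈ a.keys) →
    (ks.foldl (fun d k => d.insert k (PySem.List.sorted (d.getD k []) (fun x => x))) a).keys = a.keys ∧
    ∀ j, (ks.foldl (fun d k => d.insert k (PySem.List.sorted (d.getD k []) (fun x => x))) a).getD j [] =
      if j ∈ ks then PySem.List.sorted (a.getD j []) (fun x => x) else a.getD j [] := by
  induction ks with
  | nil => intro _ a _; exact ⟨rfl, by simp⟩
  | cons k ks ih =>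
    intro hnd a hmem
    rcases List.nodup_cons.mp hnd with ⟨hk, hnd'⟩
    simp only [List.foldl_cons]
    have hca : a.contains k = true := by
      rw [PySem.Dict.contains_eq_decide_mem_keys]
      simp [hmem k (by simp)]
    have hkeys : (a.insert k (PySem.List.sorted (a.getD k []) (fun x => x))).keys = a.keys :=
      PySem.Dict.keys_insert_of_contains _ _ hca
    obtain ⟨ihk, ihv⟩ := ih hnd' (a.insert k (PySem.List.sorted (a.getD k []) (fun x => x)))
      (by intro j hj; rw [hkeys]; exact hmem j (by simp [hj]))
    refine ⟨by rw [ihk, hkeys], ?_⟩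
    intro j
    rw [ihv j]
    by_cases hj : j ∈ ks
    · have hne : j ≠ k := fun h => hk (h ▸ hj)
      rw [if_pos hj, if_pos (by simp [hj]), PySem.Dict.getD_insert, if_neg hne]
    · rw [if_neg hj, PySem.Dict.getD_insert]
      by_cases hjk : j = k
      · rw [if_pos hjk, if_pos (by simp [hjk]), hjk]
      · rw [if_neg hjk, if_neg (by simp [hjk, hj])]

-- ===== VERDICT (by name: the statement is the Claim_ definition above) =====
theorem children_from_parent_py_spec : Claim_equal_children_from_parent_py := by
  intro parent _ hnd
  show children_from_parent_py parent = children_from_parent_py_alt parent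
  simp only [children_from_parent_py, children_from_parent_py_alt]
  set init := parent.foldl (fun d p => d.insert p.1 ([] : List Int)) PySem.Dict.empty with hinit
  set dA := parent.foldl (fun d p => if p.2 ≥ 0 then d.modify p.2 [] (fun v => v ++ [p.1]) else d) init with hdA
  set dB := parent.foldl (fun d p => if p.2 ≥ 0 then d.setdefault p.2 [] else d) init with hdB
  have hinit_nodup : init.keys.Nodup := by
    rw [hinit]
    exact PySem.Dict.nodup_keys_foldl_insert_key parent Prod.fst (fun _ _ => []) PySem.Dict.empty (by simp)
  have hinitv : ∀ k, init.getD k [] = [] := by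
    rw [hinit]
    exact init_getD parent PySem.Dict.empty (by intro k; simp)
  have hkeys : dA.keys = dB.keys := by
    rw [hdA, hdB]; exact keys_LA_RB parent init init rfl
  have hAnodup : dA.keys.Nodup := by rw [hdA]; exact nodup_keys_loopA parent init hinit_nodup
  have hBnodup : dB.keys.Nodup := hkeys ▸ hAnodup
  -- every key the fill loop touches is registered
  have hreg : ∀ node p, (PySem.Dict.mk parent).get? node = some p → 0 ≤ p → p ∈ dB.keys := by
    intro node p hg h0
    have hmem : (node, p) ∈ parent := by
      have := PySem.Dict.mem_items_of_get?_eq_some (d := PySem.Dict.mk parent) hg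
      exact this
    rw [hdB]
    exact mem_keys_RB_of_mem parent init (node, p) hmem h0
  obtain ⟨hfk, hfv⟩ := sortpass dA.keys hAnodup dA (fun k hk => hk)
  set final := dA.keys.foldl (fun d k => d.insert k (PySem.List.sorted (d.getD k []) (fun x => x))) dA with hfinal
  set fill := (PySem.List.sorted (parent.map Prod.fst) (fun x => x)).foldl
      (fun d node =>
        match (PySem.Dict.mk parent).get? node with
        | some p => if p ≥ 0 then d.modify p [] (fun l => l ++ [node]) else d
        | none => d) dB with hfill
  have hfillk : fill.keys = dB.keys := by
    rw [hfill]; exact keys_FB parent _ dB hreg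
  have hfnodup : final.keys.Nodup := hfk ▸ hAnodup
  have hfillnodup : fill.keys.Nodup := hfillk ▸ hBnodup
  rw [PySem.Dict.items_eq_map_keys final hfnodup [], PySem.Dict.items_eq_map_keys fill hfillnodup [],
    hfk, hfillk, ← hkeys]
  apply List.map_congr_left
  intro k hk
  have hBv : ∀ j, dB.getD j [] = [] := by
    intro j; rw [hdB]; exact getD_RB parent init hinitv j
  have hAv : dA.getD k [] = (parent.filter (predK k)).map Prod.fst := by
    rw [hdA, getD_LA, hinitv k, List.nil_append]
  rw [hfv k, if_pos hk, hfill, getD_FB, hBv k, List.nil_append, hAv]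
  rw [sorted_group_eq parent hnd k]
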